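-- pv_equiv track=rewrite | github.com/Y-Haoran/Methotrexate_dosage | scripts/run_formulation_descriptor_pilot.py | component_after_cut
-- ===== SOURCE A (Python) =====
-- from collections import deque
--
-- def component_after_cut(graph: dict[int, set[int]], atom_i: int, atom_j: int) -> list[int]:
--     trimmed = {node: set(neigh) for node, neigh in graph.items()}
--     trimmed[atom_i].discard(atom_j)
--     trimmed[atom_j].discard(atom_i)
--     seen = {atom_j}
--     queue: deque[int] = deque([atom_j])
--     while queue:
--         node = queue.popleft()
--         for neigh in trimmed[node]:
--             if neigh not in seen:
--                 seen.add(neigh)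
--                 queue.append(neigh)
--     if atom_i in seen:
--         raise RuntimeError(
--             "Target bond does not split the fragment into two components. Choose a non-cyclic backbone bond."
--         )
--     return sorted(seen)
-- ===== SOURCE B (Python) =====
-- def component_after_cut(graph: dict[int, set[int]], atom_i: int, atom_j: int) -> list[int]:
--     # Round-based fixpoint saturation instead of a queue-driven BFS: repeatedly sweep the
--     # current component and add every neighbour that does not cross the cut bond, until
--     # a sweep adds nothing.
--     if atom_i not in graph or atom_j not in graph:
--         raise KeyError("cut bond endpoints must be graph nodes")
--     comp = {atom_j}
--     while True:
--         nxt = set(comp)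
--         for n in comp:
--             for m in graph[n]:
--                 if not ((n == atom_i and m == atom_j) or (n == atom_j and m == atom_i)):
--                     nxt.add(m)
--         if nxt == comp:
--             break
--         comp = nxt
--     if atom_i in comp:
--         raise RuntimeError(
--             "Target bond does not split the fragment into two components. Choose a non-cyclic backbone bond."
--         )
--     return sorted(comp)
-- ===== Notes on version B (the rewrite author's own statement) =====
-- stated objective: alternative
-- what changed: The queue-driven BFS over a trimmed copy of the adjacency dict is replaced by round-based fixpoint saturation: repeatedly sweep the whole current component, adding every neighbour that does not cross the cut bond, until a sweep adds nothing; no trimmed copy, no queue, no per-node visited bookkeeping.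
import Mathlib
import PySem

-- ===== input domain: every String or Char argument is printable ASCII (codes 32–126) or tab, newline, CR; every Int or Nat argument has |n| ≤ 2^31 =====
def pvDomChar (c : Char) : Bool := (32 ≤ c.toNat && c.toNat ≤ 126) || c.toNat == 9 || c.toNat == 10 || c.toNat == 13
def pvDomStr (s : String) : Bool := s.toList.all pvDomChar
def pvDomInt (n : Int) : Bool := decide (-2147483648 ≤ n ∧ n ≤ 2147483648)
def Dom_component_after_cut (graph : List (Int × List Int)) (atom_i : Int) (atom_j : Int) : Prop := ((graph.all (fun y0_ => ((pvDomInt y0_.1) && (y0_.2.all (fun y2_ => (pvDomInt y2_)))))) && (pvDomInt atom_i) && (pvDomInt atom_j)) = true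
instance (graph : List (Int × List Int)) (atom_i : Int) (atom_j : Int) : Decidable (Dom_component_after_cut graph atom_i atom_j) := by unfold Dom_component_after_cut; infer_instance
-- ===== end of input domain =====

-- B replaces the queue-driven BFS over a trimmed adjacency copy by round-based fixpoint
-- saturation of the component set (alternative decomposition; no speed claim).


-- ===== PORT A =====
-- trimmed = {node: set(neigh) for node, neigh in graph.items()}; then the two discards
-- (Python raises KeyError if atom_i/atom_j is no key — excluded by Pre_; modify is the total form)
def pvTrimmedA (graph : List (Int × List Int)) (atom_i : Int) (atom_j : Int) :
    PySem.Dict Int (PySem.Set Int) :=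
  let t := graph.foldl (fun d p => d.insert p.1 (PySem.Set.ofList p.2)) PySem.Dict.empty
  let t := t.modify atom_i [] (fun s => PySem.Set.discard s atom_j)
  t.modify atom_j [] (fun s => PySem.Set.discard s atom_i)

-- the 'while queue:' loop; each pop handles one queue element, the inner fold is the
-- 'for neigh in trimmed[node]' loop ('trimmed[node]' KeyError on a non-key node is excluded by Pre_)
def pvBfsA (t : PySem.Dict Int (PySem.Set Int)) :
    Nat → List Int → PySem.Set Int → PySem.Set Int
  | 0, _, seen => seen
  | _ + 1, [], seen => seen
  | fuel + 1, node :: queue, seen =>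
    let st := (t.getD node []).foldl
      (fun (p : PySem.Set Int × List Int) neigh =>
        if neigh ∈ p.1 then p else (PySem.Set.add p.1 neigh, p.2 ++ [neigh]))
      (seen, queue)
    pvBfsA t fuel st.2 st.1

def component_after_cut (graph : List (Int × List Int)) (atom_i : Int) (atom_j : Int) : List Int :=
  let trimmed := pvTrimmedA graph atom_i atom_j
  -- fuel only makes the loop total: every pop was a push, and pushes ≤ 1 + Σ|neigh|
  let fuel := 1 + (graph.map (fun p => p.2.length)).sum
  let seen := pvBfsA trimmed fuel [atom_j] [atom_j]
  if atom_i ∈ seen then []   -- Python: raise RuntimeError — excluded by Pre_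
  else PySem.List.sorted seen (fun x => x) false

-- ===== PORT B =====
-- one sweep: nxt = set(comp); for n in comp: for m in graph.get(n, ()): unless the pair is the cut bond, nxt.add(m)
def pvStepB (g : PySem.Dict Int (List Int)) (atom_i : Int) (atom_j : Int)
    (comp : PySem.Set Int) : PySem.Set Int :=
  comp.foldl
    (fun nxt n =>
      (g.getD n []).foldl
        (fun nxt m =>
          if (n = atom_i ∧ m = atom_j) ∨ (n = atom_j ∧ m = atom_i) then nxt
          else PySem.Set.add nxt m)
        nxt)
    comp

-- the 'while True:' loop; fuel only makes it total (each non-final sweep adds a node)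
def pvSatB (g : PySem.Dict Int (List Int)) (atom_i : Int) (atom_j : Int) :
    Nat → PySem.Set Int → PySem.Set Int
  | 0, comp => comp
  | fuel + 1, comp =>
    let nxt := pvStepB g atom_i atom_j comp
    if PySem.Set.equal nxt comp then comp else pvSatB g atom_i atom_j fuel nxt

def component_after_cut_alt (graph : List (Int × List Int)) (atom_i : Int) (atom_j : Int) : List Int :=
  let g : PySem.Dict Int (List Int) := PySem.Dict.mk graph
  if !(g.contains atom_i) || !(g.contains atom_j) then []   -- Python: raise KeyError — excluded by Pre_
  else
    let fuel := 1 + graph.length + (graph.map (fun p => p.2.length)).sum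
    let comp := pvSatB g atom_i atom_j fuel [atom_j]
    if atom_i ∈ comp then []   -- Python: raise RuntimeError — excluded by Pre_
    else PySem.List.sorted comp (fun x => x) false

-- ===== PRECONDITION & SPEC =====
-- dict the Pythons receive (insertion order, later duplicate keys overwrite) and the set of
-- nodes reachable from atom_j without crossing the cut bond (|keys|+1 full sweeps saturate:
-- every shortest path steps only through distinct keys)
def pvPreDict (graph : List (Int × List Int)) : PySem.Dict Int (PySem.Set Int) :=
  graph.foldl (fun d p => d.insert p.1 (PySem.Set.ofList p.2)) PySem.Dict.empty

def pvPreStep (graph : List (Int × List Int)) (atom_i : Int) (atom_j : Int)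
    (s : PySem.Set Int) : PySem.Set Int :=
  PySem.Set.update s (s.flatMap (fun n =>
    ((pvPreDict graph).getD n []).filter
      (fun m => !(decide ((n = atom_i ∧ m = atom_j) ∨ (n = atom_j ∧ m = atom_i))))))

def pvReachOf (graph : List (Int × List Int)) (atom_i : Int) (atom_j : Int) : PySem.Set Int :=
  (pvPreStep graph atom_i atom_j)^[graph.length + 1] [atom_j]

-- Pre_ = inputs on which the Python A returns: atom_i and atom_j are keys, every node reachable
-- from atom_j after the cut is a key (else KeyError) and atom_i is not among them (else
-- RuntimeError). Duplicate keys are also excluded: a Python dict cannot hold them, so such an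
-- association list does not denote the dict the programs receive.
def Pre_component_after_cut (graph : List (Int × List Int)) (atom_i : Int) (atom_j : Int) : Prop :=
  (graph.map Prod.fst).Nodup ∧
  (pvPreDict graph).contains atom_i = true ∧
  (pvPreDict graph).contains atom_j = true ∧
  (∀ n ∈ pvReachOf graph atom_i atom_j, (pvPreDict graph).contains n = true) ∧
  atom_i ∉ pvReachOf graph atom_i atom_j

instance (graph : List (Int × List Int)) (atom_i : Int) (atom_j : Int) :
    Decidable (Pre_component_after_cut graph atom_i atom_j) := by
  unfold Pre_component_after_cut; infer_instance

def pvWitness_component_after_cut : (List (Int × List Int)) × Int × Int :=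
  ([(0, [1]), (1, [0])], 0, 1)

def Spec_component_after_cut (graph : List (Int × List Int)) (atom_i : Int) (atom_j : Int) (out : List Int) : Prop := out = component_after_cut_alt graph atom_i atom_j
instance (graph : List (Int × List Int)) (atom_i : Int) (atom_j : Int) (out : List Int) : Decidable (Spec_component_after_cut graph atom_i atom_j out) := by unfold Spec_component_after_cut; infer_instance

-- ===== CLAIM (what is proved, stated in full; the proofs are below) =====
def Claim_equal_component_after_cut : Prop := ∀ (graph : List (Int × List Int)) (atom_i : Int) (atom_j : Int), Dom_component_after_cut graph atom_i atom_j → Pre_component_after_cut graph atom_i atom_j → Spec_component_after_cut graph atom_i atom_j (component_after_cut graph atom_i atom_j)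


-- ===== LEMMAS AND PROOFS =====

-- the cut bond and the trimmed edge relation both programs traverse
def pvCut (atom_i atom_j n m : Int) : Prop :=
  (n = atom_i ∧ m = atom_j) ∨ (n = atom_j ∧ m = atom_i)

def pvE (graph : List (Int × List Int)) (atom_i atom_j n m : Int) : Prop :=
  m ∈ (pvPreDict graph).getD n [] ∧ ¬ pvCut atom_i atom_j n m

def pvReach (graph : List (Int × List Int)) (atom_i atom_j x : Int) : Prop :=
  Relation.ReflTransGen (fun n m => pvE graph atom_i atom_j n m) atom_j x

-- the universe every visited node lives in
def pvU (graph : List (Int × List Int)) (atom_j : Int) : PySem.Set Int :=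
  PySem.Set.ofList (atom_j :: graph.flatMap (fun p => p.2))

-- ---- association-list dictionary facts ----
lemma pv_foldl_get?_not_mem {ν : Type} (f : Int × List Int → ν) :
    ∀ (t : List (Int × List Int)) (d : PySem.Dict Int ν) (n : Int),
      n ∉ t.map Prod.fst →
      (t.foldl (fun d p => d.insert p.1 (f p)) d).get? n = d.get? n := by
  intro t
  induction t with
  | nil => intro d n _; rfl
  | cons p t ih =>
    intro d n hn
    simp only [List.map_cons, List.mem_cons, not_or] at hn
    simp only [List.foldl_cons]
    rw [ih _ n hn.2]
    simp [PySem.Dict.get?_insert, hn.1]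

lemma pv_foldl_get?_mem {ν : Type} (f : Int × List Int → ν) :
    ∀ (t : List (Int × List Int)) (d : PySem.Dict Int ν) (n : Int) (v : List Int),
      (t.map Prod.fst).Nodup → (n, v) ∈ t →
      (t.foldl (fun d p => d.insert p.1 (f p)) d).get? n = some (f (n, v)) := by
  intro t
  induction t with
  | nil => intro d n v _ h; simp at h
  | cons p t ih =>
    intro d n v hnd hmem
    simp only [List.map_cons, List.nodup_cons] at hnd
    rcases List.mem_cons.1 hmem with h | h
    · subst h
      simp only [List.foldl_cons]
      rw [pv_foldl_get?_not_mem f t _ n hnd.1]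
      simp
    · exact ih _ n v hnd.2 h

lemma pv_mk_get?_mem :
    ∀ (t : List (Int × List Int)) (n : Int) (v : List Int),
      (t.map Prod.fst).Nodup → (n, v) ∈ t →
      (PySem.Dict.mk t).get? n = some v := by
  intro t
  induction t with
  | nil => intro n v _ h; simp at h
  | cons p t ih =>
    intro n v hnd hmem
    obtain ⟨k, w⟩ := p
    simp only [List.map_cons, List.nodup_cons] at hnd
    rw [PySem.Dict.get?_mk_cons]
    rcases List.mem_cons.1 hmem with h | h
    · simp only [Prod.mk.injEq] at h
      obtain ⟨rfl, rfl⟩ := h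
      simp
    · have hne : ¬ (k == n) := by
        intro hb
        have : k = n := by simpa using hb
        apply hnd.1
        rw [this]
        exact List.mem_map.2 ⟨(n, v), h, rfl⟩
      simp [hne, ih n v hnd.2 h]

lemma pv_mk_get?_not_mem :
    ∀ (t : List (Int × List Int)) (n : Int),
      n ∉ t.map Prod.fst → (PySem.Dict.mk t).get? n = none := by
  intro t
  induction t with
  | nil => intro n _; rfl
  | cons p t ih =>
    intro n hn
    simp only [List.map_cons, List.mem_cons, not_or] at hn
    rw [PySem.Dict.get?_mk_cons]
    have : ¬ (p.1 == n) := by simpa using fun h => hn.1 h.symm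
    simp [this, ih n hn.2]

-- membership in the two dict views agrees under unique keys
lemma pv_mem_mk_iff (graph : List (Int × List Int)) (hnd : (graph.map Prod.fst).Nodup)
    (n m : Int) :
    m ∈ (PySem.Dict.mk graph).getD n [] ↔ m ∈ (pvPreDict graph).getD n [] := by
  unfold pvPreDict
  by_cases h : n ∈ graph.map Prod.fst
  · obtain ⟨⟨k, v⟩, hkv, rfl⟩ := List.mem_map.1 h
    rw [PySem.Dict.getD_eq_get?_getD, PySem.Dict.getD_eq_get?_getD,
      pv_mk_get?_mem graph (k, v).1 v hnd hkv,
      pv_foldl_get?_mem (fun p => PySem.Set.ofList p.2) graph PySem.Dict.empty (k, v).1 v hnd hkv]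
    simp [PySem.Set.mem_ofList]
  · rw [PySem.Dict.getD_eq_get?_getD, PySem.Dict.getD_eq_get?_getD,
      pv_mk_get?_not_mem graph n h,
      pv_foldl_get?_not_mem (fun p => PySem.Set.ofList p.2) graph PySem.Dict.empty n h]
    simp [PySem.Dict.get?_empty]

-- every neighbour value lies in the universe
lemma pv_mem_U_of_getD (graph : List (Int × List Int)) (atom_j n m : Int)
    (h : m ∈ (pvPreDict graph).getD n []) : m ∈ pvU graph atom_j := by
  have key : ∀ (t : List (Int × List Int)) (d : PySem.Dict Int (PySem.Set Int)),
      m ∈ (t.foldl (fun d p => d.insert p.1 (PySem.Set.ofList p.2)) d).getD n [] →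
      m ∈ d.getD n [] ∨ ∃ p ∈ t, m ∈ p.2 := by
    intro t
    induction t with
    | nil => intro d hm; exact Or.inl hm
    | cons q t ih =>
      intro d hm
      rcases ih _ hm with hm' | ⟨p, hp, hmp⟩
      · rw [PySem.Dict.getD_eq_get?_getD, PySem.Dict.get?_insert] at hm'
        by_cases hq : n = q.1
        · rw [hq, if_pos rfl] at hm'
          simp only [Option.getD_some] at hm'
          exact Or.inr ⟨q, List.mem_cons_self .., (PySem.Set.mem_ofList _ _).1 hm'⟩
        · rw [if_neg hq] at hm'
          rw [PySem.Dict.getD_eq_get?_getD]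
          exact Or.inl hm'
      · exact Or.inr ⟨p, List.mem_cons_of_mem _ hp, hmp⟩
  rcases key graph PySem.Dict.empty h with h' | ⟨p, hp, hmp⟩
  · simp [PySem.Dict.getD_empty] at h'
  · unfold pvU
    rw [PySem.Set.mem_ofList]
    exact List.mem_cons_of_mem _ (List.mem_flatMap.2 ⟨p, hp, hmp⟩)

lemma pv_E_mem_U (graph : List (Int × List Int)) (atom_i atom_j n m : Int)
    (h : pvE graph atom_i atom_j n m) : m ∈ pvU graph atom_j :=
  pv_mem_U_of_getD graph atom_j n m h.1

-- the trimmed adjacency of A is exactly the edge relation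
lemma pv_trimmed_mem (graph : List (Int × List Int)) (atom_i atom_j n m : Int) :
    m ∈ (pvTrimmedA graph atom_i atom_j).getD n [] ↔ pvE graph atom_i atom_j n m := by
  have hD : (graph.foldl (fun d p => d.insert p.1 (PySem.Set.ofList p.2)) PySem.Dict.empty)
      = pvPreDict graph := rfl
  simp only [pvTrimmedA, hD, PySem.Dict.getD_modify]
  unfold pvE pvCut
  by_cases h1 : n = atom_j
  · rw [if_pos h1]
    by_cases h3 : atom_j = atom_i
    · rw [if_pos h3]
      subst h1
      subst h3
      simp [PySem.Set.mem_discard]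
    · rw [if_neg h3]
      subst h1
      simp [PySem.Set.mem_discard, h3]
  · rw [if_neg h1]
    by_cases h2 : n = atom_i
    · rw [if_pos h2]
      subst h2
      simp [PySem.Set.mem_discard, h1]
    · rw [if_neg h2]
      simp [h1, h2]

-- a Nodup list contained in another list has no greater length
lemma pv_len_le {l u : List Int} (hl : l.Nodup) (hsub : ∀ x ∈ l, x ∈ u) :
    l.length ≤ u.length := by
  classical
  calc l.length = l.toFinset.card := (List.toFinset_card_of_nodup hl).symm
    _ ≤ u.toFinset.card :=
      Finset.card_le_card (fun x hx => List.mem_toFinset.2 (hsub x (List.mem_toFinset.1 hx)))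
    _ ≤ u.length := List.toFinset_card_le u

lemma pv_len_lt {l u : List Int} (hl : l.Nodup) (hu : u.Nodup)
    (hsub : ∀ x ∈ l, x ∈ u) (y : Int) (hy : y ∈ u) (hyn : y ∉ l) :
    l.length < u.length := by
  classical
  have h1 : l.toFinset ⊂ u.toFinset := by
    constructor
    · exact fun x hx => List.mem_toFinset.2 (hsub x (List.mem_toFinset.1 hx))
    · intro hcon
      exact hyn (List.mem_toFinset.1 (hcon (List.mem_toFinset.2 hy)))
  calc l.length = l.toFinset.card := (List.toFinset_card_of_nodup hl).symm
    _ < u.toFinset.card := Finset.card_lt_card h1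
    _ = u.length := List.toFinset_card_of_nodup hu

lemma pv_U_len (graph : List (Int × List Int)) (atom_j : Int) :
    (pvU graph atom_j).length ≤ 1 + (graph.map (fun p => p.2.length)).sum := by
  refine le_trans (PySem.Set.length_ofList_le _) ?_
  simp [List.length_flatMap]

-- ---- A-side: the BFS loop ----
lemma pv_foldA :
    ∀ (l : List Int) (seen : PySem.Set Int) (queue : List Int),
      (l.foldl (fun (p : PySem.Set Int × List Int) neigh =>
          if neigh ∈ p.1 then p else (PySem.Set.add p.1 neigh, p.2 ++ [neigh]))
        (seen, queue)).1 = PySem.Set.update seen l ∧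
      ∃ new, (l.foldl (fun (p : PySem.Set Int × List Int) neigh =>
          if neigh ∈ p.1 then p else (PySem.Set.add p.1 neigh, p.2 ++ [neigh]))
        (seen, queue)).2 = queue ++ new ∧ (∀ x ∈ new, x ∈ l) ∧
        (∀ x ∈ (l.foldl (fun (p : PySem.Set Int × List Int) neigh =>
          if neigh ∈ p.1 then p else (PySem.Set.add p.1 neigh, p.2 ++ [neigh]))
          (seen, queue)).1, x ∈ seen ∨ x ∈ new) ∧
        (l.foldl (fun (p : PySem.Set Int × List Int) neigh =>
          if neigh ∈ p.1 then p else (PySem.Set.add p.1 neigh, p.2 ++ [neigh]))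
          (seen, queue)).1.length + queue.length
          = seen.length + (l.foldl (fun (p : PySem.Set Int × List Int) neigh =>
              if neigh ∈ p.1 then p else (PySem.Set.add p.1 neigh, p.2 ++ [neigh]))
              (seen, queue)).2.length := by
  intro l
  induction l with
  | nil =>
    intro seen queue
    refine ⟨by simp [PySem.Set.update_nil], [], by simp, by simp, by simp, by simp⟩
  | cons x l ih =>
    intro seen queue
    simp only [List.foldl_cons]
    by_cases hx : x ∈ seen
    · rw [if_pos hx]
      obtain ⟨h1, new, h2, h3, h4, h5⟩ := ih seen queue
      refine ⟨by rw [h1, PySem.Set.update_cons, PySem.Set.add_of_mem hx], new, h2,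
        fun y hy => List.mem_cons_of_mem _ (h3 y hy), h4, h5⟩
    · rw [if_neg hx]
      obtain ⟨h1, new, h2, h3, h4, h5⟩ := ih (PySem.Set.add seen x) (queue ++ [x])
      refine ⟨by rw [h1, PySem.Set.update_cons], x :: new, ?_, ?_, ?_, ?_⟩
      · rw [h2, List.append_assoc]; rfl
      · intro y hy
        rcases List.mem_cons.1 hy with rfl | hy
        · exact List.mem_cons_self ..
        · exact List.mem_cons_of_mem _ (h3 y hy)
      · intro y hy
        rcases h4 y hy with hy' | hy'
        · rcases (PySem.Set.mem_add _ _ _).1 hy' with hy'' | rfl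
          · exact Or.inl hy''
          · exact Or.inr (List.mem_cons_self ..)
        · exact Or.inr (List.mem_cons_of_mem _ hy')
      · have hlen : (PySem.Set.add seen x).length = seen.length + 1 := by
          rw [PySem.Set.add_of_not_mem hx]
          simp
        simp only [List.length_append, List.length_cons, List.length_nil] at h5 ⊢
        omega

lemma pv_bfsA (graph : List (Int × List Int)) (atom_i atom_j : Int) :
    ∀ (fuel : Nat) (queue : List Int) (seen : PySem.Set Int),
      seen.Nodup →
      (∀ x ∈ queue, x ∈ seen) →
      (∀ x ∈ seen, pvReach graph atom_i atom_j x) →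
      (∀ x ∈ seen, x ∈ pvU graph atom_j) →
      (∀ x ∈ seen, x ∈ queue ∨ ∀ m, pvE graph atom_i atom_j x m → m ∈ seen) →
      (pvU graph atom_j).length + queue.length ≤ fuel + seen.length →
      (pvBfsA (pvTrimmedA graph atom_i atom_j) fuel queue seen).Nodup ∧
      (∀ x ∈ pvBfsA (pvTrimmedA graph atom_i atom_j) fuel queue seen,
        pvReach graph atom_i atom_j x) ∧
      (∀ x ∈ pvBfsA (pvTrimmedA graph atom_i atom_j) fuel queue seen,
        ∀ m, pvE graph atom_i atom_j x m →
          m ∈ pvBfsA (pvTrimmedA graph atom_i atom_j) fuel queue seen) ∧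
      (∀ x ∈ seen, x ∈ pvBfsA (pvTrimmedA graph atom_i atom_j) fuel queue seen) := by
  intro fuel
  induction fuel with
  | zero =>
    intro queue seen hnodup hqs hsound hU hinv hfuel
    have hlen := pv_len_le hnodup hU
    have hq : queue = [] := by
      cases queue with
      | nil => rfl
      | cons a q => simp only [List.length_cons] at hfuel; omega
    subst hq
    exact ⟨hnodup, hsound, fun x hx m hm => by
      rcases hinv x hx with h | h
      · simp at h
      · exact h m hm, fun x hx => hx⟩
  | succ fuel ih =>
    intro queue seen hnodup hqs hsound hU hinv hfuel
    cases queue with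
    | nil =>
      exact ⟨hnodup, hsound, fun x hx m hm => by
        rcases hinv x hx with h | h
        · simp at h
        · exact h m hm, fun x hx => hx⟩
    | cons node rest =>
      simp only [pvBfsA]
      obtain ⟨h1, new, h2, h3, h4, h5⟩ :=
        pv_foldA ((pvTrimmedA graph atom_i atom_j).getD node []) seen rest
      have hE : ∀ m, m ∈ (pvTrimmedA graph atom_i atom_j).getD node [] ↔
          pvE graph atom_i atom_j node m :=
        fun m => pv_trimmed_mem graph atom_i atom_j node m
      have hnode_reach : pvReach graph atom_i atom_j node :=
        hsound node (hqs node (List.mem_cons_self ..))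
      have hseen_sub : ∀ x ∈ seen, x ∈ (((pvTrimmedA graph atom_i atom_j).getD node []).foldl
          (fun (p : PySem.Set Int × List Int) neigh =>
            if neigh ∈ p.1 then p else (PySem.Set.add p.1 neigh, p.2 ++ [neigh]))
          (seen, rest)).1 := by
        intro x hx
        rw [h1, PySem.Set.mem_update]
        exact Or.inl hx
      refine (fun R => ⟨R.1, R.2.1, R.2.2.1, fun x hx => R.2.2.2 x (hseen_sub x hx)⟩)
        (ih _ _ ?_ ?_ ?_ ?_ ?_ ?_)
      · rw [h1]
        apply PySem.Set.nodup_update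
        exact hnodup
      · intro x hx
        rw [h2] at hx
        rw [h1, PySem.Set.mem_update]
        rcases List.mem_append.1 hx with hx | hx
        · exact Or.inl (hqs x (List.mem_cons_of_mem _ hx))
        · exact Or.inr (h3 x hx)
      · intro x hx
        rcases h4 x hx with hx' | hx'
        · exact hsound x hx'
        · exact hnode_reach.tail ((hE x).1 (h3 x hx'))
      · intro x hx
        rcases h4 x hx with hx' | hx'
        · exact hU x hx'
        · exact pv_E_mem_U graph atom_i atom_j node x ((hE x).1 (h3 x hx'))
      · intro x hx
        rcases h4 x hx with hx' | hx'
        · rcases hinv x hx' with hq' | hcl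
          · rcases List.mem_cons.1 hq' with rfl | hq''
            · refine Or.inr (fun m hm => ?_)
              rw [h1, PySem.Set.mem_update]
              exact Or.inr ((hE m).2 hm)
            · refine Or.inl ?_
              rw [h2]
              exact List.mem_append.2 (Or.inl hq'')
          · exact Or.inr (fun m hm => hseen_sub m (hcl m hm))
        · refine Or.inl ?_
          rw [h2]
          exact List.mem_append.2 (Or.inr hx')
      · simp only [List.length_cons] at hfuel
        omega

-- ---- B-side: the saturation sweep ----
lemma pv_innerB (atom_i atom_j n : Int) :
    ∀ (l : List Int) (nxt : PySem.Set Int) (x : Int),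
      x ∈ l.foldl (fun nxt m =>
          if (n = atom_i ∧ m = atom_j) ∨ (n = atom_j ∧ m = atom_i) then nxt
          else PySem.Set.add nxt m) nxt ↔
      x ∈ nxt ∨ (x ∈ l ∧ ¬ pvCut atom_i atom_j n x) := by
  intro l
  induction l with
  | nil => intro nxt x; simp
  | cons m l ih =>
    intro nxt x
    simp only [List.foldl_cons]
    by_cases hc : (n = atom_i ∧ m = atom_j) ∨ (n = atom_j ∧ m = atom_i)
    · rw [if_pos hc, ih]
      unfold pvCut
      constructor
      · rintro (h | h)
        · exact Or.inl h
        · exact Or.inr ⟨List.mem_cons_of_mem _ h.1, h.2⟩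
      · rintro (h | ⟨hm, hcut⟩)
        · exact Or.inl h
        · rcases List.mem_cons.1 hm with rfl | hm'
          · exact absurd hc hcut
          · exact Or.inr ⟨hm', hcut⟩
    · rw [if_neg hc, ih]
      unfold pvCut
      rw [PySem.Set.mem_add]
      constructor
      · rintro ((h | rfl) | h)
        · exact Or.inl h
        · exact Or.inr ⟨List.mem_cons_self .., hc⟩
        · exact Or.inr ⟨List.mem_cons_of_mem _ h.1, h.2⟩
      · rintro (h | ⟨hm, hcut⟩)
        · exact Or.inl (Or.inl h)
        · rcases List.mem_cons.1 hm with rfl | hm'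
          · exact Or.inl (Or.inr rfl)
          · exact Or.inr ⟨hm', hcut⟩

lemma pv_outerB (g : PySem.Dict Int (List Int)) (atom_i atom_j : Int) :
    ∀ (cs : List Int) (nxt : PySem.Set Int) (x : Int),
      x ∈ cs.foldl (fun nxt n =>
          (g.getD n []).foldl (fun nxt m =>
            if (n = atom_i ∧ m = atom_j) ∨ (n = atom_j ∧ m = atom_i) then nxt
            else PySem.Set.add nxt m) nxt) nxt ↔
      x ∈ nxt ∨ ∃ n ∈ cs, x ∈ g.getD n [] ∧ ¬ pvCut atom_i atom_j n x := by
  intro cs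
  induction cs with
  | nil => intro nxt x; simp
  | cons c cs ih =>
    intro nxt x
    simp only [List.foldl_cons]
    rw [ih]
    constructor
    · rintro (h | ⟨n, hn, hx⟩)
      · rcases (pv_innerB atom_i atom_j c _ nxt x).1 h with h' | h'
        · exact Or.inl h'
        · exact Or.inr ⟨c, List.mem_cons_self .., h'⟩
      · exact Or.inr ⟨n, List.mem_cons_of_mem _ hn, hx⟩
    · rintro (h | ⟨n, hn, hx⟩)
      · exact Or.inl ((pv_innerB atom_i atom_j c _ nxt x).2 (Or.inl h))
      · rcases List.mem_cons.1 hn with rfl | hn'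
        · exact Or.inl ((pv_innerB atom_i atom_j n _ nxt x).2 (Or.inr hx))
        · exact Or.inr ⟨n, hn', hx⟩

lemma pv_stepB_mem (graph : List (Int × List Int)) (hnd : (graph.map Prod.fst).Nodup)
    (atom_i atom_j : Int) (comp : PySem.Set Int) (x : Int) :
    x ∈ pvStepB (PySem.Dict.mk graph) atom_i atom_j comp ↔
      x ∈ comp ∨ ∃ n ∈ comp, pvE graph atom_i atom_j n x := by
  unfold pvStepB
  rw [pv_outerB]
  constructor
  · rintro (h | ⟨n, hn, hx, hc⟩)
    · exact Or.inl h
    · exact Or.inr ⟨n, hn, (pv_mem_mk_iff graph hnd n x).1 hx, hc⟩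
  · rintro (h | ⟨n, hn, hx, hc⟩)
    · exact Or.inl h
    · exact Or.inr ⟨n, hn, (pv_mem_mk_iff graph hnd n x).2 hx, hc⟩

lemma pv_innerB_nodup (atom_i atom_j n : Int) :
    ∀ (l : List Int) (nxt : PySem.Set Int), nxt.Nodup →
      (l.foldl (fun nxt m =>
          if (n = atom_i ∧ m = atom_j) ∨ (n = atom_j ∧ m = atom_i) then nxt
          else PySem.Set.add nxt m) nxt).Nodup := by
  intro l
  induction l with
  | nil => intro nxt h; exact h
  | cons m l ih =>
    intro nxt h
    simp only [List.foldl_cons]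
    by_cases hc : (n = atom_i ∧ m = atom_j) ∨ (n = atom_j ∧ m = atom_i)
    · rw [if_pos hc]; exact ih nxt h
    · rw [if_neg hc]
      apply ih
      apply PySem.Set.nodup_add
      exact h

lemma pv_stepB_nodup (g : PySem.Dict Int (List Int)) (atom_i atom_j : Int)
    (comp : PySem.Set Int) (h : comp.Nodup) :
    (pvStepB g atom_i atom_j comp).Nodup := by
  unfold pvStepB
  have key : ∀ (cs : List Int) (nxt : PySem.Set Int), nxt.Nodup →
      (cs.foldl (fun nxt n =>
        (g.getD n []).foldl (fun nxt m =>
          if (n = atom_i ∧ m = atom_j) ∨ (n = atom_j ∧ m = atom_i) then nxt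
          else PySem.Set.add nxt m) nxt) nxt).Nodup := by
    intro cs
    induction cs with
    | nil => intro nxt h'; exact h'
    | cons c cs ih =>
      intro nxt h'
      simp only [List.foldl_cons]
      exact ih _ (pv_innerB_nodup atom_i atom_j c _ nxt h')
  exact key comp comp h

lemma pv_satB (graph : List (Int × List Int)) (hnd : (graph.map Prod.fst).Nodup)
    (atom_i atom_j : Int) :
    ∀ (fuel : Nat) (comp : PySem.Set Int),
      comp.Nodup →
      (∀ x ∈ comp, pvReach graph atom_i atom_j x) →
      (∀ x ∈ comp, x ∈ pvU graph atom_j) →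
      (pvU graph atom_j).length + 1 ≤ fuel + comp.length →
      (pvSatB (PySem.Dict.mk graph) atom_i atom_j fuel comp).Nodup ∧
      (∀ x ∈ pvSatB (PySem.Dict.mk graph) atom_i atom_j fuel comp,
        pvReach graph atom_i atom_j x) ∧
      (∀ x ∈ pvSatB (PySem.Dict.mk graph) atom_i atom_j fuel comp,
        ∀ m, pvE graph atom_i atom_j x m →
          m ∈ pvSatB (PySem.Dict.mk graph) atom_i atom_j fuel comp) ∧
      (∀ x ∈ comp, x ∈ pvSatB (PySem.Dict.mk graph) atom_i atom_j fuel comp) := by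
  intro fuel
  induction fuel with
  | zero =>
    intro comp hnodup hsound hU hfuel
    exfalso
    have := pv_len_le hnodup hU
    omega
  | succ fuel ih =>
    intro comp hnodup hsound hU hfuel
    simp only [pvSatB]
    by_cases heq : PySem.Set.equal (pvStepB (PySem.Dict.mk graph) atom_i atom_j comp) comp = true
    · rw [if_pos heq]
      refine ⟨hnodup, hsound, ?_, fun x hx => hx⟩
      intro x hx m hm
      have hmem : m ∈ pvStepB (PySem.Dict.mk graph) atom_i atom_j comp :=
        (pv_stepB_mem graph hnd atom_i atom_j comp m).2 (Or.inr ⟨x, hx, hm⟩)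
      exact ((PySem.Set.equal_iff _ _).1 heq m).1 hmem
    · rw [if_neg heq]
      have hsub : ∀ x ∈ comp, x ∈ pvStepB (PySem.Dict.mk graph) atom_i atom_j comp :=
        fun x hx => (pv_stepB_mem graph hnd atom_i atom_j comp x).2 (Or.inl hx)
      have hex : ∃ y ∈ pvStepB (PySem.Dict.mk graph) atom_i atom_j comp, y ∉ comp := by
        by_contra hcon
        push Not at hcon
        apply heq
        rw [PySem.Set.equal_iff]
        exact fun y => ⟨fun hy => hcon y hy, fun hy => hsub y hy⟩
      obtain ⟨y, hy1, hy2⟩ := hex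
      have hlt : comp.length < (pvStepB (PySem.Dict.mk graph) atom_i atom_j comp).length :=
        pv_len_lt hnodup (pv_stepB_nodup _ atom_i atom_j comp hnodup) hsub y hy1 hy2
      have R := ih (pvStepB (PySem.Dict.mk graph) atom_i atom_j comp)
        (pv_stepB_nodup _ atom_i atom_j comp hnodup)
        (by
          intro x hx
          rcases (pv_stepB_mem graph hnd atom_i atom_j comp x).1 hx with h | ⟨n, hn, he⟩
          · exact hsound x h
          · exact (hsound n hn).tail he)
        (by
          intro x hx
          rcases (pv_stepB_mem graph hnd atom_i atom_j comp x).1 hx with h | ⟨n, hn, he⟩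
          · exact hU x h
          · exact pv_E_mem_U graph atom_i atom_j n x he)
        (by omega)
      exact ⟨R.1, R.2.1, R.2.2.1, fun x hx => R.2.2.2 x (hsub x hx)⟩

-- the two dict views also agree on key membership (unique keys)
lemma pv_contains_mk_iff (graph : List (Int × List Int)) (hnd : (graph.map Prod.fst).Nodup)
    (n : Int) :
    (PySem.Dict.mk graph).contains n = (pvPreDict graph).contains n := by
  unfold pvPreDict
  rw [PySem.Dict.contains_eq_isSome_get?, PySem.Dict.contains_eq_isSome_get?]
  by_cases h : n ∈ graph.map Prod.fst
  · obtain ⟨⟨k, v⟩, hkv, rfl⟩ := List.mem_map.1 h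
    rw [pv_mk_get?_mem graph (k, v).1 v hnd hkv,
      pv_foldl_get?_mem (fun p => PySem.Set.ofList p.2) graph PySem.Dict.empty (k, v).1 v hnd hkv]
    rfl
  · rw [pv_mk_get?_not_mem graph n h,
      pv_foldl_get?_not_mem (fun p => PySem.Set.ofList p.2) graph PySem.Dict.empty n h]
    rfl

-- a sound closed set containing atom_j has exactly the reachable members
lemma pv_char (graph : List (Int × List Int)) (atom_i atom_j : Int) (S : PySem.Set Int)
    (hj : atom_j ∈ S)
    (hsound : ∀ x ∈ S, pvReach graph atom_i atom_j x)
    (hclosed : ∀ x ∈ S, ∀ m, pvE graph atom_i atom_j x m → m ∈ S) :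
    ∀ x, x ∈ S ↔ pvReach graph atom_i atom_j x := by
  intro x
  refine ⟨hsound x, ?_⟩
  intro h
  induction h with
  | refl => exact hj
  | tail hr he ih => exact hclosed _ ih _ he

-- ===== VERDICT (by name: the statement is the Claim_ definition above) =====
theorem component_after_cut_spec : Claim_equal_component_after_cut := by
  intro graph atom_i atom_j _ hpre
  unfold Pre_component_after_cut at hpre
  obtain ⟨hnd, hci, hcj, _, _⟩ := hpre
  unfold Spec_component_after_cut component_after_cut component_after_cut_alt
  simp only [pv_contains_mk_iff graph hnd, hci, hcj, Bool.not_true, Bool.or_self,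
    Bool.false_eq_true, if_false]
  have hjU : atom_j ∈ pvU graph atom_j := by
    unfold pvU
    rw [PySem.Set.mem_ofList]
    exact List.mem_cons_self ..
  have hA := pv_bfsA graph atom_i atom_j (1 + (graph.map (fun p => p.2.length)).sum)
    [atom_j] [atom_j]
    (List.nodup_singleton _)
    (fun x hx => hx)
    (by
      intro x hx
      rcases List.mem_singleton.1 hx with rfl
      exact Relation.ReflTransGen.refl)
    (by
      intro x hx
      rcases List.mem_singleton.1 hx with rfl
      exact hjU)
    (fun x hx => Or.inl hx)
    (by
      have := pv_U_len graph atom_j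
      simp only [List.length_singleton]
      omega)
  have hB := pv_satB graph hnd atom_i atom_j
    (1 + graph.length + (graph.map (fun p => p.2.length)).sum) [atom_j]
    (List.nodup_singleton _)
    (by
      intro x hx
      rcases List.mem_singleton.1 hx with rfl
      exact Relation.ReflTransGen.refl)
    (by
      intro x hx
      rcases List.mem_singleton.1 hx with rfl
      exact hjU)
    (by
      have := pv_U_len graph atom_j
      simp only [List.length_singleton]
      omega)
  obtain ⟨hAnd, hAsound, hAclosed, hAcont⟩ := hA
  obtain ⟨hBnd, hBsound, hBclosed, hBcont⟩ := hB
  have hAchar := pv_char graph atom_i atom_j _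
    (hAcont atom_j (List.mem_singleton.2 rfl)) hAsound hAclosed
  have hBchar := pv_char graph atom_i atom_j _
    (hBcont atom_j (List.mem_singleton.2 rfl)) hBsound hBclosed
  have hiff : ∀ x,
      x ∈ pvBfsA (pvTrimmedA graph atom_i atom_j)
        (1 + (graph.map (fun p => p.2.length)).sum) [atom_j] [atom_j] ↔
      x ∈ pvSatB (PySem.Dict.mk graph) atom_i atom_j
        (1 + graph.length + (graph.map (fun p => p.2.length)).sum) [atom_j] :=
    fun x => (hAchar x).trans (hBchar x).symm
  have hperm : (pvBfsA (pvTrimmedA graph atom_i atom_j)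
        (1 + (graph.map (fun p => p.2.length)).sum) [atom_j] [atom_j]).Perm
      (pvSatB (PySem.Dict.mk graph) atom_i atom_j
        (1 + graph.length + (graph.map (fun p => p.2.length)).sum) [atom_j]) :=
    (List.perm_ext_iff_of_nodup hAnd hBnd).2 hiff
  by_cases hai : atom_i ∈ pvBfsA (pvTrimmedA graph atom_i atom_j)
      (1 + (graph.map (fun p => p.2.length)).sum) [atom_j] [atom_j]
  · rw [if_pos hai, if_pos ((hiff atom_i).1 hai)]
  · rw [if_neg hai, if_neg (fun h => hai ((hiff atom_i).2 h))]
    exact PySem.List.sorted_eq_sorted_of_perm _ _ _ (fun a b h => h) hperm
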